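-- pv_equiv track=rewrite | github.com/manncodes/NeedleChain | local_model_serve.py | colorize_vllm_log
-- ===== SOURCE A (Python) =====
-- class Colors:
--     RESET = '\033[0m'
--     BOLD = '\033[1m'
--     DIM = '\033[2m'
--
--     # Standard colors
--     RED = '\033[31m'
--     GREEN = '\033[32m'
--     YELLOW = '\033[33m'
--     BLUE = '\033[34m'
--     MAGENTA = '\033[35m'
--     CYAN = '\033[36m'
--     WHITE = '\033[37m'
--
--     # Bright colors
--     BRIGHT_RED = '\033[91m'
--     BRIGHT_GREEN = '\033[92m'
--     BRIGHT_YELLOW = '\033[93m'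
--     BRIGHT_BLUE = '\033[94m'
--     BRIGHT_MAGENTA = '\033[95m'
--     BRIGHT_CYAN = '\033[96m'
--     BRIGHT_WHITE = '\033[97m'
--
--     # Background colors
--     BG_BLUE = '\033[44m'
--     BG_GREEN = '\033[42m'
--     BG_RED = '\033[41m'
--
-- def colorize_vllm_log(line):
--     """Apply colors to vLLM log lines based on content."""
--     line = line.strip()
--     if not line:
--         return line
--
--     # Error messages
--     if any(keyword in line.lower() for keyword in ['error', 'failed', 'exception', 'traceback']):
--         return f"{Colors.BRIGHT_RED}{line}{Colors.RESET}"
--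
--     # Warning messages
--     if any(keyword in line.lower() for keyword in ['warning', 'warn']):
--         return f"{Colors.BRIGHT_YELLOW}{line}{Colors.RESET}"
--
--     # Success/completion messages
--     if any(keyword in line.lower() for keyword in ['successfully', 'completed', 'ready', 'started', 'loaded']):
--         return f"{Colors.BRIGHT_GREEN}{line}{Colors.RESET}"
--
--     # Model loading info
--     if any(keyword in line.lower() for keyword in ['loading', 'initializing', 'model']):
--         return f"{Colors.BRIGHT_CYAN}{line}{Colors.RESET}"
--
--     # GPU/CUDA info
--     if any(keyword in line.lower() for keyword in ['gpu', 'cuda', 'tensor']):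
--         return f"{Colors.BRIGHT_MAGENTA}{line}{Colors.RESET}"
--
--     # Info level messages
--     if 'info' in line.lower() or line.startswith('INFO'):
--         return f"{Colors.BLUE}{line}{Colors.RESET}"
--
--     # Debug messages
--     if 'debug' in line.lower() or line.startswith('DEBUG'):
--         return f"{Colors.DIM}{line}{Colors.RESET}"
--
--     # Default - slightly dimmed
--     return f"{Colors.WHITE}{line}{Colors.RESET}"
-- ===== SOURCE B (Python) =====
-- _KW = {
--     'error': 1, 'failed': 1, 'exception': 1, 'traceback': 1,
--     'warning': 2, 'warn': 2,
--     'successfully': 3, 'completed': 3, 'ready': 3, 'started': 3, 'loaded': 3,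
--     'loading': 4, 'initializing': 4, 'model': 4,
--     'gpu': 5, 'cuda': 5, 'tensor': 5,
--     'info': 6,
--     'debug': 7,
-- }
-- _PALETTE = {1: '\033[91m', 2: '\033[93m', 3: '\033[92m', 4: '\033[96m',
--             5: '\033[95m', 6: '\033[34m', 7: '\033[2m'}
--
-- def colorize_vllm_log(line):
--     """Single left-to-right scan over the line: at each position note any keyword
--     that starts there (flat keyword->priority dict) and keep the minimum priority
--     seen; map that priority to its color (8 = no keyword -> white)."""
--     line = line.strip()
--     if not line:
--         return line
--     low = line.lower()
--     best = 8
--     for i in range(len(low)):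
--         for kw, p in _KW.items():
--             if p < best and low.startswith(kw, i):
--                 best = p
--     return _PALETTE.get(best, '\033[37m') + line + '\033[0m'
-- ===== Notes on version B (the rewrite author's own statement) =====
-- stated objective: alternative
-- what changed: Replaces the keyword-driven if-cascade of substring-membership tests with a single position-by-position scan of the lowercased line that checks, at each index, which keywords of a flat keyword->priority dict start there, keeps the minimum priority seen, and maps that priority to a color via a palette dict; A's two startswith checks for upper-case level prefixes are dropped as redundant (such a line already contains the lowercase keyword after lowercasing).
import Mathlib
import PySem

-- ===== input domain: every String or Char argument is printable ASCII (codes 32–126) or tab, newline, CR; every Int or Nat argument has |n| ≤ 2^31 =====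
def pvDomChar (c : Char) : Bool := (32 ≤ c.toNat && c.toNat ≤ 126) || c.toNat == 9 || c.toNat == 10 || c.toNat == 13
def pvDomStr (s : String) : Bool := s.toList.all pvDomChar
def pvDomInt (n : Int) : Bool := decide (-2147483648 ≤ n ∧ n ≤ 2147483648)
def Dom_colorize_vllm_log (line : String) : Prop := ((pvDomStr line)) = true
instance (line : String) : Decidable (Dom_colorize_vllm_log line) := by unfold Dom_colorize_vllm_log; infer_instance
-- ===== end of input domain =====

-- B replaces A's keyword-driven if-cascade of substring tests by a single position-by-position scan of the
-- lowercased line keeping the minimum priority of any keyword starting at each index (objective: alternative).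

-- ===== PORT A =====
def colorize_vllm_log (line : String) : String :=
  let line := PySem.Str.strip line
  if line = "" then line
  else if ["error", "failed", "exception", "traceback"].any
            (fun kw => PySem.Str.isIn kw (PySem.Str.lower line)) then
    "\x1b[91m" ++ line ++ "\x1b[0m"
  else if ["warning", "warn"].any
            (fun kw => PySem.Str.isIn kw (PySem.Str.lower line)) then
    "\x1b[93m" ++ line ++ "\x1b[0m"
  else if ["successfully", "completed", "ready", "started", "loaded"].any
            (fun kw => PySem.Str.isIn kw (PySem.Str.lower line)) then
    "\x1b[92m" ++ line ++ "\x1b[0m"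
  else if ["loading", "initializing", "model"].any
            (fun kw => PySem.Str.isIn kw (PySem.Str.lower line)) then
    "\x1b[96m" ++ line ++ "\x1b[0m"
  else if ["gpu", "cuda", "tensor"].any
            (fun kw => PySem.Str.isIn kw (PySem.Str.lower line)) then
    "\x1b[95m" ++ line ++ "\x1b[0m"
  else if PySem.Str.isIn "info" (PySem.Str.lower line) || PySem.Str.startswith line "INFO" then
    "\x1b[34m" ++ line ++ "\x1b[0m"
  else if PySem.Str.isIn "debug" (PySem.Str.lower line) || PySem.Str.startswith line "DEBUG" then
    "\x1b[2m" ++ line ++ "\x1b[0m"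
  else
    "\x1b[37m" ++ line ++ "\x1b[0m"

-- ===== PORT B =====
-- the flat keyword -> priority dict _KW (insertion order) and the priority -> color palette
def pvKW : List (String × Nat) :=
  [("error", 1), ("failed", 1), ("exception", 1), ("traceback", 1),
   ("warning", 2), ("warn", 2),
   ("successfully", 3), ("completed", 3), ("ready", 3), ("started", 3), ("loaded", 3),
   ("loading", 4), ("initializing", 4), ("model", 4),
   ("gpu", 5), ("cuda", 5), ("tensor", 5),
   ("info", 6),
   ("debug", 7)]

def pvPalette : PySem.Dict Nat String := PySem.Dict.ofList
  [(1, "\x1b[91m"), (2, "\x1b[93m"), (3, "\x1b[92m"), (4, "\x1b[96m"),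
   (5, "\x1b[95m"), (6, "\x1b[34m"), (7, "\x1b[2m")]

def colorize_vllm_log_alt (line : String) : String :=
  let line := PySem.Str.strip line
  if line = "" then line
  else
    let low := PySem.Str.lower line
    let best := (PySem.List.pyRange 0 (PySem.Str.len low) 1).foldl
      (fun b i => pvKW.foldl
        -- low.startswith(kw, i) is ported by hand as startswith on low[i:] (exact since 0 ≤ i)
        (fun b kp => if kp.2 < b ∧ PySem.Chars.startswith (low.toList.drop i.toNat) kp.1.toList then kp.2 else b)
        b) 8
    PySem.Dict.getD pvPalette best "\x1b[37m" ++ line ++ "\x1b[0m"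

-- ===== PRECONDITION & SPEC =====
def Spec_colorize_vllm_log (line : String) (out : String) : Prop := out = colorize_vllm_log_alt line
instance (line : String) (out : String) : Decidable (Spec_colorize_vllm_log line out) := by unfold Spec_colorize_vllm_log; infer_instance

-- ===== CLAIM =====
def Claim_equal_colorize_vllm_log : Prop := ∀ (line : String), Dom_colorize_vllm_log line → Spec_colorize_vllm_log line (colorize_vllm_log line)

-- ===== LEMMAS AND PROOFS =====

-- A's keyword groups in priority order, and 'some keyword of group p occurs in l'
def pvGroup : Nat → List String
  | 1 => ["error", "failed", "exception", "traceback"]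
  | 2 => ["warning", "warn"]
  | 3 => ["successfully", "completed", "ready", "started", "loaded"]
  | 4 => ["loading", "initializing", "model"]
  | 5 => ["gpu", "cuda", "tensor"]
  | 6 => ["info"]
  | 7 => ["debug"]
  | _ => []

def pvHit (l : List Char) (p : Nat) : Bool := (pvGroup p).any (fun k => PySem.Chars.isIn k.toList l)

-- the multiset of priorities of all (position, keyword) matches of B's scan
def pvS (l : List Char) : List Nat :=
  (PySem.List.pyRange 0 (l.length : Int) 1).flatMap
    (fun i => (pvKW.filter (fun kp => PySem.Chars.startswith (l.drop i.toNat) kp.1.toList)).map (·.2))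

theorem pv_foldl_min_if {α : Type} (L : List α) (c : α → Bool) (f : α → Nat) (b : Nat) :
    L.foldl (fun b x => if f x < b ∧ c x then f x else b) b = ((L.filter c).map f).foldl min b := by
  induction L generalizing b with
  | nil => rfl
  | cons a t ih =>
    cases hc : c a with
    | false => simp [List.foldl, List.filter, hc, ih]
    | true =>
      simp only [List.foldl, List.filter, hc, List.map]
      rw [ih]
      congr 1
      by_cases h : f a < b <;> simp [h, Nat.min_def]

theorem pv_foldl_foldl_min (L : List Int) (g : Int → List Nat) (b : Nat) :
    L.foldl (fun b i => (g i).foldl min b) b = (L.flatMap g).foldl min b := by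
  induction L generalizing b with
  | nil => rfl
  | cons a t ih => simp [List.foldl, List.flatMap_cons, List.foldl_append, ih]

theorem pv_fold_eq (l : List Char) :
    (PySem.List.pyRange 0 (l.length : Int) 1).foldl
      (fun b i => pvKW.foldl
        (fun b kp => if kp.2 < b ∧ PySem.Chars.startswith (l.drop i.toNat) kp.1.toList then kp.2 else b)
        b) 8
    = (pvS l).foldl min 8 := by
  unfold pvS
  rw [← pv_foldl_foldl_min]
  apply PySem.List.foldl_congr_mem
  intro b i _
  exact pv_foldl_min_if pvKW (fun kp => PySem.Chars.startswith (l.drop i.toNat) kp.1.toList) (·.2) b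

theorem pv_exists_pos_iff (l kw : List Char) (hk : kw ≠ []) :
    (∃ i, i ∈ PySem.List.pyRange 0 (l.length : Int) 1 ∧
      PySem.Chars.startswith (l.drop i.toNat) kw = true) ↔ PySem.Chars.isIn kw l = true := by
  rw [← PySem.Chars.exists_prefix_drop_iff_isIn]
  constructor
  · rintro ⟨i, _, hs⟩
    exact ⟨i.toNat, (PySem.Chars.startswith_iff _ _).mp hs⟩
  · rintro ⟨j, hp⟩
    have hj : j < l.length := by
      by_contra h
      have : l.drop j = [] := List.drop_eq_nil_of_le (by omega)
      rw [this] at hp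
      exact hk (List.prefix_nil.mp hp)
    refine ⟨(j : Int), ?_, ?_⟩
    · rw [PySem.List.mem_pyRange_one]; omega
    · rw [PySem.Chars.startswith_iff]; simpa using hp

theorem mem_pvS (l : List Char) (x : Nat) :
    x ∈ pvS l ↔ ∃ kp ∈ pvKW, kp.2 = x ∧ PySem.Chars.isIn kp.1.toList l = true := by
  unfold pvS
  simp only [List.mem_flatMap, List.mem_map, List.mem_filter]
  constructor
  · rintro ⟨i, hi, kp, ⟨hkp, hs⟩, hx⟩
    refine ⟨kp, hkp, hx, ?_⟩
    have hk : kp.1.toList ≠ [] := by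
      fin_cases hkp <;> decide
    exact (pv_exists_pos_iff l kp.1.toList hk).mp ⟨i, hi, hs⟩
  · rintro ⟨kp, hkp, hx, hin⟩
    have hk : kp.1.toList ≠ [] := by
      fin_cases hkp <;> decide
    obtain ⟨i, hi, hs⟩ := (pv_exists_pos_iff l kp.1.toList hk).mpr hin
    exact ⟨i, hi, kp, ⟨hkp, hs⟩, hx⟩

theorem pvS_hit (l : List Char) (x : Nat) (hx : x ∈ pvS l) :
    1 ≤ x ∧ x ≤ 7 ∧ pvHit l x = true := by
  obtain ⟨kp, hkp, hx2, hin⟩ := (mem_pvS l x).mp hx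
  subst hx2
  fin_cases hkp <;> simp only at hin <;>
    refine ⟨by norm_num, by norm_num, ?_⟩ <;> simp [pvHit, pvGroup] <;> simp at hin <;> tauto

theorem pvHit_mem (l : List Char) (p : Nat) (h1 : 1 ≤ p) (h7 : p ≤ 7) (h : pvHit l p = true) :
    p ∈ pvS l := by
  unfold pvHit at h
  rw [List.any_eq_true] at h
  obtain ⟨k, hk, hin⟩ := h
  rw [mem_pvS]
  refine ⟨(k, p), ?_, rfl, by simpa using hin⟩
  interval_cases p <;> fin_cases hk <;> decide

theorem pv_min_char (l : List Char) (r : Nat)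
    (hmem : r = 8 ∨ r ∈ pvS l) (hley : ∀ y ∈ pvS l, r ≤ y) :
    r = (if pvHit l 1 then 1 else if pvHit l 2 then 2 else if pvHit l 3 then 3 else
         if pvHit l 4 then 4 else if pvHit l 5 then 5 else if pvHit l 6 then 6 else
         if pvHit l 7 then 7 else 8) := by
  have hub : ∀ p, 1 ≤ p → p ≤ 7 → pvHit l p = true → r ≤ p :=
    fun p a b c => hley p (pvHit_mem l p a b c)
  have hbound : r = 8 ∨ (1 ≤ r ∧ r ≤ 7 ∧ pvHit l r = true) := by
    rcases hmem with h | h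
    · exact Or.inl h
    · exact Or.inr (pvS_hit l r h)
  split_ifs with h1 h2 h3 h4 h5 h6 h7
  · have hup := hub 1 (by norm_num) (by norm_num) h1
    rcases hbound with h | ⟨ha, hb, hc⟩
    · omega
    · interval_cases r
      simp_all
  · have hup := hub 2 (by norm_num) (by norm_num) h2
    rcases hbound with h | ⟨ha, hb, hc⟩
    · omega
    · interval_cases r <;> simp_all
  · have hup := hub 3 (by norm_num) (by norm_num) h3
    rcases hbound with h | ⟨ha, hb, hc⟩
    · omega
    · interval_cases r <;> simp_all
  · have hup := hub 4 (by norm_num) (by norm_num) h4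
    rcases hbound with h | ⟨ha, hb, hc⟩
    · omega
    · interval_cases r <;> simp_all
  · have hup := hub 5 (by norm_num) (by norm_num) h5
    rcases hbound with h | ⟨ha, hb, hc⟩
    · omega
    · interval_cases r <;> simp_all
  · have hup := hub 6 (by norm_num) (by norm_num) h6
    rcases hbound with h | ⟨ha, hb, hc⟩
    · omega
    · interval_cases r <;> simp_all
  · have hup := hub 7 (by norm_num) (by norm_num) h7
    rcases hbound with h | ⟨ha, hb, hc⟩
    · omega
    · interval_cases r <;> simp_all
  · rcases hbound with h | ⟨ha, hb, hc⟩
    · exact h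
    · interval_cases r <;> simp_all

theorem pvBest_eq (l : List Char) :
    (pvS l).foldl min 8 =
      (if pvHit l 1 then 1 else if pvHit l 2 then 2 else if pvHit l 3 then 3 else
       if pvHit l 4 then 4 else if pvHit l 5 then 5 else if pvHit l 6 then 6 else
       if pvHit l 7 then 7 else 8) := by
  apply pv_min_char
  · exact PySem.List.foldl_min_mem (pvS l) 8
  · exact (PySem.List.foldl_min_le (pvS l) 8).2

theorem startswith_upper_isIn_lower (s : String) (p q : List Char)
    (hmap : p.map PySem.Chars.lowerChar = q)
    (h : PySem.Chars.startswith s.toList p = true) :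
    PySem.Chars.isIn q (PySem.Chars.lower s.toList) = true := by
  rw [PySem.Chars.isIn_iff_infix]
  have hpre : p <+: s.toList := (PySem.Chars.startswith_iff s.toList p).mp h
  have hq : q <+: PySem.Chars.lower s.toList := by
    have := hpre.map PySem.Chars.lowerChar
    simpa [PySem.Chars.lower, hmap] using this
  exact hq.isInfix

theorem info_cond (s : String) :
    (PySem.Str.isIn "info" (PySem.Str.lower s) || PySem.Str.startswith s "INFO")
      = PySem.Str.isIn "info" (PySem.Str.lower s) := by
  have key : PySem.Str.startswith s "INFO" = true →
      PySem.Str.isIn "info" (PySem.Str.lower s) = true := by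
    intro h
    have := startswith_upper_isIn_lower s ['I','N','F','O'] ['i','n','f','o']
      (by decide) (by simpa using h)
    simpa using this
  cases h : PySem.Str.startswith s "INFO"
  · simp
  · simp only [key h, Bool.true_or]

theorem debug_cond (s : String) :
    (PySem.Str.isIn "debug" (PySem.Str.lower s) || PySem.Str.startswith s "DEBUG")
      = PySem.Str.isIn "debug" (PySem.Str.lower s) := by
  have key : PySem.Str.startswith s "DEBUG" = true →
      PySem.Str.isIn "debug" (PySem.Str.lower s) = true := by
    intro h
    have := startswith_upper_isIn_lower s ['D','E','B','U','G'] ['d','e','b','u','g']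
      (by decide) (by simpa using h)
    simpa using this
  cases h : PySem.Str.startswith s "DEBUG"
  · simp
  · simp only [key h, Bool.true_or]

-- ===== VERDICT =====
theorem colorize_vllm_log_spec : Claim_equal_colorize_vllm_log := by
  intro line _
  unfold Spec_colorize_vllm_log colorize_vllm_log colorize_vllm_log_alt
  by_cases h0 : PySem.Str.strip line = ""
  · rw [if_pos h0, if_pos h0]
  · rw [if_neg h0, if_neg h0]
    simp only [PySem.Str.len_eq]
    rw [pv_fold_eq, pvBest_eq]
    simp only [info_cond, debug_cond]
    simp only [pvHit, pvGroup, List.any_cons, List.any_nil, Bool.or_false, PySem.Str.isIn_eq]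
    split_ifs <;> rfl
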